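-- pv_equiv track=rewrite | github.com/Wang-Haolong/Python_learning | triple_action.py | check
-- ===== SOURCE A (Python) =====
-- def check(a,b,c):
--     alln=[a,b,c]
--     nums=[False,]
--     for i in range(9):
--         nums.append(True)
--     for i in alln:
--         while i:
--             if nums[i%10]:
--                 nums[i%10]=False
--             else:
--                 return False
--             i=i//10
--     return True
-- ===== SOURCE B (Python) =====
-- def check(a, b, c):
--     if a < 0 or b < 0 or c < 0:
--         return False
--     s = "".join(str(i) for i in (a, b, c) if i)
--     return "0" not in s and len(s) == len(set(s))
-- ===== Notes on version B (the rewrite author's own statement) =====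
-- stated objective: alternative
-- what changed: A validates digits arithmetically while extracting them, via repeated %10///10 against a 10-entry boolean availability table with early returns; B never does digit arithmetic: after rejecting negatives it builds the decimal string representation str() of the nonzero inputs, joins them, and checks the joined string for '0' and for duplicate characters via a set of chars.
import Mathlib
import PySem

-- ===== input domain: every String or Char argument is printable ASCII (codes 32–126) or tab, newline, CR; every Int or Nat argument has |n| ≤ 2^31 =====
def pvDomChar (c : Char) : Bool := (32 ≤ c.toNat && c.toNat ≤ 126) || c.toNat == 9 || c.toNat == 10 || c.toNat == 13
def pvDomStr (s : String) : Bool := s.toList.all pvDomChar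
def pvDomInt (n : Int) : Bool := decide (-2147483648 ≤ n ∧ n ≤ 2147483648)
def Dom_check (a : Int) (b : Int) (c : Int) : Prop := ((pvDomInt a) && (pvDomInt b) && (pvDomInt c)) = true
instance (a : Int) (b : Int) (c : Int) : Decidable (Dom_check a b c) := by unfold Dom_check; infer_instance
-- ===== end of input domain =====

-- B replaces A's arithmetic digit extraction against a boolean availability table by a string-based
-- check: join the decimal representations str(i) of the nonzero inputs (negatives rejected up front)
-- and test the joined string for '0' and for duplicate characters (objective: alternative).

-- ===== PORT A =====
-- termination measure for A's while loop: each non-returning iteration clears one True entry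
lemma pvCountLt (nums : List Bool) (d : Int) (hd : 0 ≤ d)
    (hg : PySem.List.pyGetD nums d false = true) :
    (PySem.List.pySetD nums d false).count true < nums.count true := by
  rw [PySem.List.pySetD_of_nonneg nums false hd]
  rw [PySem.List.pyGetD_of_nonneg nums false hd] at hg
  generalize d.toNat = n at hg ⊢
  induction nums generalizing n with
  | nil => simp [List.getD] at hg
  | cons x xs ih =>
    cases n with
    | zero =>
      simp [List.getD] at hg
      subst hg
      simp
    | succ m =>
      simp only [List.getD, List.getElem?_cons_succ, List.set] at hg ⊢
      have := ih m (by simpa [List.getD] using hg)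
      simp only [List.count_cons]
      omega

-- the `while i:` loop of A: tests nums[i%10], clears it, or returns False (none).
-- nums[i%10] / nums[i%10]=False are ported with pyGetD/pySetD: i%10 is always in [0,10) and
-- nums always has length 10, so Python never raises IndexError here.
def checkWhileA (i : Int) (nums : List Bool) : Option (List Bool) :=
  if i = 0 then some nums
  else
    if PySem.List.pyGetD nums (PySem.Int.mod i 10) false then
      checkWhileA (PySem.Int.floordiv i 10) (PySem.List.pySetD nums (PySem.Int.mod i 10) false)
    else none
termination_by nums.count true
decreasing_by exact pvCountLt nums _ (PySem.Int.mod_nonneg _ (by norm_num)) (by assumption)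

def check (a : Int) (b : Int) (c : Int) : Bool :=
  -- nums=[False]; for i in range(9): nums.append(True)
  let nums := (List.range 9).foldl (fun l _ => l ++ [true]) [false]
  match checkWhileA a nums with
  | none => false
  | some n1 =>
    match checkWhileA b n1 with
    | none => false
    | some n2 =>
      match checkWhileA c n2 with
      | none => false
      | some _ => true

-- ===== PORT B =====
-- s = "".join(str(i) for i in (a, b, c) if i): str(i) is PySem.Int.toChars, the join with the empty
-- separator is concatenation of the pieces (worked on the List Char side throughout, per PYSEM.md)
def check_alt (a : Int) (b : Int) (c : Int) : Bool :=
  if a < 0 ∨ b < 0 ∨ c < 0 then false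
  else
    let s : List Char := ((([a, b, c].filter (fun i => !(i == 0))).map PySem.Int.toChars)).flatten
    !(s.contains '0') && (s.length == (PySem.Set.ofList s).length)

-- ===== PRECONDITION & SPEC =====
def Spec_check (a : Int) (b : Int) (c : Int) (out : Bool) : Prop := out = check_alt a b c
instance (a : Int) (b : Int) (c : Int) (out : Bool) : Decidable (Spec_check a b c out) := by unfold Spec_check; infer_instance

-- ===== CLAIM (what is proved, stated in full; the proofs are below) =====
def Claim_equal_check : Prop := ∀ (a : Int) (b : Int) (c : Int), Dom_check a b c → Spec_check a b c (check a b c)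

-- ===== LEMMAS AND PROOFS =====

-- A's while loop specialised to nonnegative input (proof-side helper)
def checkWhile (i : Nat) (nums : List Bool) : Option (List Bool) :=
  if h : i = 0 then some nums
  else
    if nums.getD (i % 10) false then checkWhile (i / 10) (nums.set (i % 10) false)
    else none
termination_by i
decreasing_by exact Nat.div_lt_self (Nat.pos_of_ne_zero h) (by norm_num)

-- the digits of n, least significant first (the values A's while loop visits)
def pyDigits (i : Nat) : List Nat :=
  if h : i = 0 then []
  else i % 10 :: pyDigits (i / 10)
termination_by i
decreasing_by exact Nat.div_lt_self (Nat.pos_of_ne_zero h) (by norm_num)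

lemma checkWhileA_natCast (n : Nat) : ∀ nums : List Bool,
    checkWhileA (n : Int) nums = checkWhile n nums := by
  induction n using Nat.strong_induction_on with
  | _ n ih =>
    intro nums
    rw [checkWhileA, checkWhile]
    by_cases h : n = 0
    · subst h; simp
    · have h' : (n : Int) ≠ 0 := by exact_mod_cast h
      have hm : PySem.Int.mod (n : Int) 10 = ((n % 10 : Nat) : Int) := by
        exact_mod_cast PySem.Int.mod_natCast n 10
      have hf : PySem.Int.floordiv (n : Int) 10 = ((n / 10 : Nat) : Int) := by
        exact_mod_cast PySem.Int.floordiv_natCast n 10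
      rw [if_neg h', dif_neg h, hm, hf, PySem.List.pyGetD_natCast, PySem.List.pySetD_natCast,
        ih (n / 10) (Nat.div_lt_self (Nat.pos_of_ne_zero h) (by norm_num))]

lemma checkWhileA_neg (k : Nat) : ∀ nums : List Bool, nums.count true = k →
    ∀ i : Int, i < 0 → checkWhileA i nums = none := by
  induction k using Nat.strong_induction_on with
  | _ k ih =>
    intro nums hk i hi
    rw [checkWhileA, if_neg (by omega)]
    by_cases hg : PySem.List.pyGetD nums (PySem.Int.mod i 10) false = true
    · rw [if_pos hg]
      have hcnt := pvCountLt nums _ (PySem.Int.mod_nonneg _ (by norm_num)) hg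
      have hneg : PySem.Int.floordiv i 10 < 0 := by
        rw [PySem.Int.floordiv_lt_iff_lt_mul (by norm_num : (0:Int) < 10)]
        omega
      exact ih _ (hk ▸ hcnt) _ rfl _ hneg
    · rw [if_neg hg]

lemma check_neg (a b c : Int) (h : a < 0 ∨ b < 0 ∨ c < 0) : check a b c = false := by
  simp only [check]
  rcases h with h | h | h
  · rw [checkWhileA_neg _ _ rfl a h]
  · cases checkWhileA a ((List.range 9).foldl (fun l _ => l ++ [true]) [false]) with
    | none => rfl
    | some n1 =>
      simp only []
      rw [checkWhileA_neg _ n1 rfl b h]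
  · cases checkWhileA a ((List.range 9).foldl (fun l _ => l ++ [true]) [false]) with
    | none => rfl
    | some n1 =>
      simp only []
      cases checkWhileA b n1 with
      | none => rfl
      | some n2 =>
        simp only []
        rw [checkWhileA_neg _ n2 rfl c h]

-- the availability table after the digits in `seen` have been consumed
def mkTable (seen : List Nat) : List Bool :=
  (List.range 10).map (fun d => decide (d ≠ 0) && !(seen.contains d))

-- A's early-exit condition, digit by digit
def okd : List Nat → List Nat → Bool
  | [], _ => true
  | d :: ds, seen => (decide (d ≠ 0) && !(seen.contains d)) && okd ds (d :: seen)

lemma table0 : (List.range 9).foldl (fun l _ => l ++ [true]) [false] = mkTable [] := by decide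

lemma table_getD (seen : List Nat) (d : Nat) (hd : d < 10) :
    (mkTable seen).getD d false = (decide (d ≠ 0) && !(seen.contains d)) := by
  simp [mkTable, List.getD, hd]

lemma table_set (seen : List Nat) (d : Nat) (hd : d < 10) :
    (mkTable seen).set d false = mkTable (d :: seen) := by
  apply List.ext_getElem
  · simp [mkTable]
  · intro j h1 h2
    have hj : j < 10 := by simpa [mkTable] using h2
    by_cases hjd : j = d
    · subst hjd
      simp [mkTable]
    · simp [mkTable, List.getElem_set, hjd]
      intro _ _
      omega

lemma checkWhile_table (i : Nat) : ∀ seen : List Nat,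
    checkWhile i (mkTable seen) =
      if okd (pyDigits i) seen then some (mkTable ((pyDigits i).reverse ++ seen)) else none := by
  induction i using Nat.strong_induction_on with
  | _ i ih =>
    intro seen
    by_cases h : i = 0
    · subst h; simp [checkWhile, pyDigits, okd]
    · have hlt : i / 10 < i := Nat.div_lt_self (Nat.pos_of_ne_zero h) (by norm_num)
      have hd : i % 10 < 10 := Nat.mod_lt _ (by norm_num)
      rw [checkWhile, pyDigits]
      simp only [h, dite_false]
      rw [table_getD seen _ hd]
      cases hx : (decide (i % 10 ≠ 0) && !(seen.contains (i % 10))) with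
      | false =>
        have hok : okd (i % 10 :: pyDigits (i / 10)) seen = false := by
          simp only [Bool.and_eq_false_iff, decide_eq_false_iff_not, Decidable.not_not,
            Bool.not_eq_false', List.contains_eq_mem, decide_eq_true_eq] at hx
          simp only [okd, Bool.and_eq_false_iff, decide_eq_false_iff_not, Decidable.not_not,
            Bool.not_eq_false', List.contains_eq_mem, decide_eq_true_eq]
          left
          exact hx
        rw [hok]
        simp
      | true =>
        have hok : okd (i % 10 :: pyDigits (i / 10)) seen =
            okd (pyDigits (i / 10)) (i % 10 :: seen) := by
          simp only [okd, hx, Bool.true_and]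
        rw [hok, table_set seen _ hd, ih _ hlt (i % 10 :: seen)]
        simp only [if_true]
        split_ifs
        · congr 2
          simp
        · rfl

lemma okd_append (ds₁ ds₂ : List Nat) : ∀ seen,
    okd (ds₁ ++ ds₂) seen = (okd ds₁ seen && okd ds₂ (ds₁.reverse ++ seen)) := by
  induction ds₁ with
  | nil => intro seen; simp [okd]
  | cons d ds ih =>
    intro seen
    simp only [List.cons_append, okd, ih (d :: seen), List.reverse_cons, List.append_assoc,
      List.nil_append, Bool.and_assoc]

lemma okd_iff (ds : List Nat) : ∀ seen,
    okd ds seen = true ↔ (∀ d ∈ ds, d ≠ 0) ∧ (∀ d ∈ ds, d ∉ seen) ∧ ds.Nodup := by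
  induction ds with
  | nil => intro seen; simp [okd]
  | cons d ds ih =>
    intro seen
    simp only [okd, Bool.and_eq_true, decide_eq_true_eq, Bool.not_eq_eq_eq_not, Bool.not_true,
      List.contains_eq_mem, decide_eq_false_iff_not, ih (d :: seen), List.mem_cons,
      List.nodup_cons]
    constructor
    · rintro ⟨⟨h0, hs⟩, hall, hseen, hnd⟩
      refine ⟨?_, ?_, ?_, hnd⟩
      · rintro x (rfl | hx)
        · exact h0
        · exact hall x hx
      · rintro x (rfl | hx)
        · exact hs
        · intro hxs
          exact hseen x hx (Or.inr hxs)
      · intro hdds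
        exact hseen d hdds (Or.inl rfl)
    · rintro ⟨hall, hseen, hdds, hnd⟩
      refine ⟨⟨hall d (Or.inl rfl), hseen d (Or.inl rfl)⟩,
        fun x hx => hall x (Or.inr hx), fun x hx => ?_, hnd⟩
      rintro (rfl | hxs)
      · exact hdds hx
      · exact hseen x (Or.inr hx) hxs

lemma check_eq_okd (a b c : Int) (ha0 : 0 ≤ a) (hb0 : 0 ≤ b) (hc0 : 0 ≤ c) :
    check a b c =
      okd (pyDigits a.toNat ++ pyDigits b.toNat ++ pyDigits c.toNat) [] := by
  simp only [check, table0]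
  rw [show a = (a.toNat : Int) from (Int.toNat_of_nonneg ha0).symm,
    show b = (b.toNat : Int) from (Int.toNat_of_nonneg hb0).symm,
    show c = (c.toNat : Int) from (Int.toNat_of_nonneg hc0).symm]
  simp only [checkWhileA_natCast, Int.toNat_natCast]
  rw [checkWhile_table a.toNat [],
    okd_append (pyDigits a.toNat ++ pyDigits b.toNat) (pyDigits c.toNat),
    okd_append (pyDigits a.toNat) (pyDigits b.toNat)]
  by_cases ha : okd (pyDigits a.toNat) [] = true
  · rw [if_pos ha]
    simp only [List.append_nil]
    rw [checkWhile_table b.toNat]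
    by_cases hb : okd (pyDigits b.toNat) (pyDigits a.toNat).reverse = true
    · rw [if_pos hb]
      simp only []
      rw [checkWhile_table c.toNat]
      by_cases hc : okd (pyDigits c.toNat)
          ((pyDigits b.toNat).reverse ++ (pyDigits a.toNat).reverse) = true
      · rw [if_pos hc]
        simp only [ha, hb, Bool.true_and]
        rw [← hc]
        congr 1
        simp [List.reverse_append]
      · rw [if_neg hc]
        simp only [ha, hb, Bool.true_and]
        have hcf : okd (pyDigits c.toNat)
            ((pyDigits b.toNat).reverse ++ (pyDigits a.toNat).reverse) = false :=
          Bool.eq_false_iff.mpr hc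
        rw [List.reverse_append, hcf]
    · rw [if_neg hb]
      simp [ha, hb]
  · rw [if_neg ha]
    simp [ha]

-- ===== B-side: the string str(i) is the reversed digitChar image of pyDigits i.toNat =====

lemma pyDigits_lt (n : Nat) : ∀ d ∈ pyDigits n, d < 10 := by
  induction n using Nat.strong_induction_on with
  | _ n ih =>
    intro d hd
    rw [pyDigits] at hd
    by_cases h : n = 0
    · simp [h] at hd
    · rw [dif_neg h] at hd
      rcases List.mem_cons.mp hd with rfl | hd'
      · exact Nat.mod_lt _ (by norm_num)
      · exact ih _ (Nat.div_lt_self (Nat.pos_of_ne_zero h) (by norm_num)) d hd'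

lemma toDigitsCore_eq (f : Nat) : ∀ n acc, n < f → 0 < n →
    Nat.toDigitsCore 10 f n acc = ((pyDigits n).map Nat.digitChar).reverse ++ acc := by
  induction f with
  | zero => intro n acc h; omega
  | succ f ih =>
    intro n acc hn hpos
    rw [Nat.toDigitsCore]
    by_cases h10 : n / 10 = 0
    · rw [if_pos h10]
      rw [pyDigits, dif_neg (Nat.pos_iff_ne_zero.mp hpos), pyDigits, dif_pos h10]
      simp
    · rw [if_neg h10]
      have hlt : n / 10 < f := by
        have := Nat.div_lt_self hpos (by norm_num : 1 < 10)
        omega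
      rw [ih (n / 10) _ hlt (Nat.pos_of_ne_zero h10)]
      conv_rhs => rw [pyDigits, dif_neg (Nat.pos_iff_ne_zero.mp hpos)]
      simp

lemma toChars_pos (n : Nat) (hpos : 0 < n) :
    PySem.Int.toChars (n : Int) = ((pyDigits n).map Nat.digitChar).reverse := by
  rw [PySem.Int.toChars]
  rw [if_neg (by omega)]
  simp only [Int.toNat_natCast]
  rw [Nat.toDigits, toDigitsCore_eq (n + 1) n [] (by omega) hpos]
  simp

-- the filtered str-pieces of one nonnegative input, zero or not
lemma piece_eq (i : Int) (hi : 0 ≤ i) :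
    (if (i == 0) = false then PySem.Int.toChars i else []) =
      ((pyDigits i.toNat).map Nat.digitChar).reverse := by
  by_cases h : i = 0
  · subst h
    simp [pyDigits]
  · rw [if_pos (by simpa using h)]
    have hpos : 0 < i.toNat := by omega
    conv_lhs => rw [show i = (i.toNat : Int) from (Int.toNat_of_nonneg hi).symm]
    exact toChars_pos _ hpos

lemma flatten_filter_map {α β : Type} (p : α → Bool) (g : α → List β) (xs : List α) :
    ((xs.filter p).map g).flatten = (xs.map (fun x => if p x then g x else [])).flatten := by
  induction xs with
  | nil => rfl
  | cons x xs ih =>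
    by_cases h : p x
    · simp [h, ih]
    · simp only [List.filter_cons, Bool.not_eq_true] at *
      simp [h, ih]

lemma digitChar_inj : ∀ d < 10, ∀ e < 10, Nat.digitChar d = Nat.digitChar e → d = e := by
  decide

lemma digitChar_eq_zero : ∀ d < 10, (Nat.digitChar d = '0' ↔ d = 0) := by
  decide

-- counting distinct elements with PySem.Set (B's len(set(s)) test)
lemma foldl_add_len_le (xs : List Char) : ∀ s : PySem.Set Char,
    (xs.foldl PySem.Set.add s).length ≤ s.length + xs.length := by
  induction xs with
  | nil => intro s; simp
  | cons x xs ih =>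
    intro s
    simp only [List.foldl_cons]
    refine le_trans (ih _) ?_
    by_cases h : x ∈ s
    · simp [PySem.Set.add, h]
    · simp [PySem.Set.add, h]
      omega

lemma foldl_add_len (xs : List Char) : ∀ s : PySem.Set Char,
    (xs.foldl PySem.Set.add s).length = s.length + xs.length ↔
      (∀ x ∈ xs, x ∉ s) ∧ xs.Nodup := by
  induction xs with
  | nil => intro s; simp
  | cons x xs ih =>
    intro s
    simp only [List.foldl_cons, List.nodup_cons]
    by_cases h : x ∈ s
    · have hle := foldl_add_len_le xs (PySem.Set.add s x)
      have hlen : (PySem.Set.add s x).length = s.length := by simp [PySem.Set.add, h]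
      constructor
      · intro heq
        rw [hlen] at hle
        rw [heq] at hle
        simp only [List.length_cons] at hle
        exact absurd hle (by omega)
      · rintro ⟨hnot, _⟩
        exact absurd h (hnot x (List.mem_cons_self))
    · have hlen : (PySem.Set.add s x).length = s.length + 1 := by simp [PySem.Set.add, h]
      have hmem' : ∀ y, y ∈ PySem.Set.add s x ↔ y ∈ s ∨ y = x := by
        intro y
        simp [PySem.Set.add, h]
      have hshift : (xs.foldl PySem.Set.add (PySem.Set.add s x)).length
            = s.length + (x :: xs).length ↔
          (xs.foldl PySem.Set.add (PySem.Set.add s x)).length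
            = (PySem.Set.add s x).length + xs.length := by
        rw [hlen]
        constructor <;> intro hh <;> (simp only [List.length_cons] at *; omega)
      rw [hshift, ih (PySem.Set.add s x)]
      constructor
      · rintro ⟨hnot, hnd⟩
        refine ⟨?_, ?_, hnd⟩
        · intro y hy
          rcases List.mem_cons.mp hy with rfl | hy'
          · exact h
          · intro hys
            exact hnot y hy' ((hmem' y).mpr (Or.inl hys))
        · intro hx
          exact hnot x hx ((hmem' x).mpr (Or.inr rfl))
      · rintro ⟨hnot, hxxs, hnd⟩
        refine ⟨?_, hnd⟩
        intro y hy hmy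
        rcases (hmem' y).mp hmy with hys | rfl
        · exact hnot y (List.mem_cons_of_mem _ hy) hys
        · exact hxxs hy

lemma ofList_len (xs : List Char) :
    ((PySem.Set.ofList xs).length = xs.length) ↔ xs.Nodup := by
  rw [PySem.Set.ofList_eq_foldl]
  have h := foldl_add_len xs PySem.Set.empty
  simp only [PySem.Set.empty, List.length_nil, Nat.zero_add, List.not_mem_nil,
    not_false_iff, implies_true, true_and] at h
  exact h

lemma check_alt_iff (a b c : Int) (ha0 : 0 ≤ a) (hb0 : 0 ≤ b) (hc0 : 0 ≤ c) :
    check_alt a b c = true ↔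
      (0 ∉ pyDigits a.toNat ++ pyDigits b.toNat ++ pyDigits c.toNat ∧
       (pyDigits a.toNat ++ pyDigits b.toNat ++ pyDigits c.toNat).Nodup) := by
  have hneg' : ¬(a < 0 ∨ b < 0 ∨ c < 0) := by push Not; exact ⟨ha0, hb0, hc0⟩
  have hL10 : ∀ d ∈ pyDigits a.toNat ++ pyDigits b.toNat ++ pyDigits c.toNat, d < 10 := by
    intro d hd
    simp only [List.mem_append] at hd
    rcases hd with (hd | hd) | hd
    · exact pyDigits_lt _ d hd
    · exact pyDigits_lt _ d hd
    · exact pyDigits_lt _ d hd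
  have hperm :
      (((pyDigits a.toNat).map Nat.digitChar).reverse ++
        (((pyDigits b.toNat).map Nat.digitChar).reverse ++
          ((pyDigits c.toNat).map Nat.digitChar).reverse)).Perm
        ((pyDigits a.toNat ++ pyDigits b.toNat ++ pyDigits c.toNat).map Nat.digitChar) := by
    simp only [List.map_append, List.append_assoc]
    exact ((pyDigits a.toNat).map Nat.digitChar).reverse_perm.append
      ((((pyDigits b.toNat).map Nat.digitChar).reverse_perm).append
        (((pyDigits c.toNat).map Nat.digitChar).reverse_perm))
  have hmem : '0' ∈ ((pyDigits a.toNat).map Nat.digitChar).reverse ++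
        (((pyDigits b.toNat).map Nat.digitChar).reverse ++
          ((pyDigits c.toNat).map Nat.digitChar).reverse) ↔
      0 ∈ pyDigits a.toNat ++ pyDigits b.toNat ++ pyDigits c.toNat := by
    rw [hperm.mem_iff, List.mem_map]
    constructor
    · rintro ⟨d, hd, hdc⟩
      rwa [(digitChar_eq_zero d (hL10 d hd)).mp hdc] at hd
    · intro h0
      exact ⟨0, h0, rfl⟩
  have hnd : (((pyDigits a.toNat).map Nat.digitChar).reverse ++
        (((pyDigits b.toNat).map Nat.digitChar).reverse ++
          ((pyDigits c.toNat).map Nat.digitChar).reverse)).Nodup ↔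
      (pyDigits a.toNat ++ pyDigits b.toNat ++ pyDigits c.toNat).Nodup := by
    rw [hperm.nodup_iff]
    constructor
    · exact List.Nodup.of_map _
    · intro h
      exact h.map_on (fun x hx y hy hxy => digitChar_inj x (hL10 x hx) y (hL10 y hy) hxy)
  unfold check_alt
  rw [if_neg hneg']
  simp only [flatten_filter_map, List.map_cons, List.map_nil, List.flatten_cons,
    List.flatten_nil, List.append_nil, piece_eq a ha0, piece_eq b hb0, piece_eq c hc0,
    Bool.and_eq_true, Bool.not_eq_eq_eq_not, Bool.not_true, List.contains_eq_mem,
    decide_eq_false_iff_not, beq_iff_eq]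
  rw [eq_comm, ofList_len, hmem, hnd]

-- ===== VERDICT (by name: the statement is the Claim_ definition above) =====
theorem check_spec : Claim_equal_check := by
  intro a b c _
  unfold Spec_check
  by_cases hneg : a < 0 ∨ b < 0 ∨ c < 0
  · rw [check_neg a b c hneg]
    unfold check_alt
    rw [if_pos hneg]
  push Not at hneg
  obtain ⟨ha0, hb0, hc0⟩ := hneg
  rw [check_eq_okd a b c ha0 hb0 hc0]
  have hA := okd_iff (pyDigits a.toNat ++ pyDigits b.toNat ++ pyDigits c.toNat) []
  simp only [List.not_mem_nil, not_false_iff, implies_true, true_and] at hA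
  have hB := check_alt_iff a b c ha0 hb0 hc0
  have hiff : (∀ d ∈ pyDigits a.toNat ++ pyDigits b.toNat ++ pyDigits c.toNat, d ≠ 0) ↔
      0 ∉ pyDigits a.toNat ++ pyDigits b.toNat ++ pyDigits c.toNat := by
    constructor
    · intro h h0
      exact h 0 h0 rfl
    · intro h d hd he
      rw [he] at hd
      exact h hd
  rw [hiff] at hA
  cases hok : okd (pyDigits a.toNat ++ pyDigits b.toNat ++ pyDigits c.toNat) [] with
  | true => exact (hB.mpr (hA.mp hok)).symm
  | false =>
    cases halt : check_alt a b c with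
    | false => rfl
    | true => exact absurd (hA.mpr (hB.mp halt)) (by rw [hok]; simp)
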